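-- pv_equiv track=rewrite | github.com/ksavierra/Pyton-HW-2 | les1.py | AmountSearch
-- ===== SOURCE A (Python) =====
-- def AmountSearch(number):
--     if number >= 0:
--         return sum([int(i) for i in str(number)])
--     else:
--         number = abs(number)
--         Amount = sum([int(i) for i in str(number)])
--         Amount -= int(str(number)[0]) * 2
--         return Amount
-- ===== SOURCE B (Python) =====
-- def AmountSearch(number):
--     n = abs(number)
--     total = 0
--     msd = 0
--     while n > 0:
--         msd = n % 10
--         total += msd
--         n //= 10
--     if number >= 0:
--         return total
--     return total - 2 * msd
-- ===== Notes on version B (the rewrite author's own statement) =====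
-- stated objective: alternative
-- what changed: Replaces the string conversion and per-character int() parsing with a pure-arithmetic remainder/quotient loop that accumulates the digit sum and keeps the last extracted digit as the most-significant one for the negative branch.
import Mathlib
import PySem

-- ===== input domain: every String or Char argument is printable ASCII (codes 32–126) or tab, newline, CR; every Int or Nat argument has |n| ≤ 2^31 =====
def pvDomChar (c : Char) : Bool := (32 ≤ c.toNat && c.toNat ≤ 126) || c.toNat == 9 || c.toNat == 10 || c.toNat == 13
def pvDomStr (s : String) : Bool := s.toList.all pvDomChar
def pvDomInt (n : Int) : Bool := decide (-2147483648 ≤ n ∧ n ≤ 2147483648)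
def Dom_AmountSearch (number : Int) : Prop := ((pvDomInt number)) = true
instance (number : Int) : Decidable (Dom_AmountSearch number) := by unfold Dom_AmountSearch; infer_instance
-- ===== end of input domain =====

-- B replaces str()-and-parse digit summation by a pure remainder/quotient arithmetic loop (objective: alternative).


-- ===== PORT A =====
-- int(i) for a one-character string i; Python raises ValueError on non-digits, which never occurs
-- on the characters of str(abs(number)), so the .getD 0 default is never reached.
def pvCharInt (c : Char) : Int := (PySem.Int.ofStr? (String.singleton c)).getD 0

-- sum([int(i) for i in s])
def pvDigitSum (s : String) : Int := (s.toList.map pvCharInt).sum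

def AmountSearch (number : Int) : Int :=
  if number ≥ 0 then
    pvDigitSum (PySem.Int.toStr number)
  else
    let n := |number|
    let amount := pvDigitSum (PySem.Int.toStr n)
    amount - ((PySem.Str.pyGet? (PySem.Int.toStr n) 0).map pvCharInt).getD 0 * 2

-- ===== PORT B =====
-- while n > 0: msd = n % 10; total += msd; n //= 10
def pvAltLoop (n : Nat) (total msd : Int) : Int × Int :=
  if h : n = 0 then (total, msd)
  else pvAltLoop (n / 10) (total + ((n % 10 : Nat) : Int)) ((n % 10 : Nat) : Int)
termination_by n
decreasing_by exact Nat.div_lt_self (Nat.pos_of_ne_zero h) (by norm_num)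

def AmountSearch_alt (number : Int) : Int :=
  let p := pvAltLoop number.natAbs 0 0
  if number ≥ 0 then p.1 else p.1 - 2 * p.2

-- ===== PRECONDITION & SPEC =====
def Spec_AmountSearch (number : Int) (out : Int) : Prop := out = AmountSearch_alt number
instance (number : Int) (out : Int) : Decidable (Spec_AmountSearch number out) := by unfold Spec_AmountSearch; infer_instance

-- ===== CLAIM (what is proved, stated in full; the proofs are below) =====
def Claim_equal_AmountSearch : Prop := ∀ (number : Int), Dom_AmountSearch number → Spec_AmountSearch number (AmountSearch number)

-- ===== LEMMAS AND PROOFS =====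

theorem pvCharInt_digitChar (d : Nat) (hd : d < 10) : pvCharInt (Nat.digitChar d) = (d : Int) := by
  interval_cases d <;> decide

theorem pv_toDigitsCore_eq (fuel : Nat) : ∀ (n : Nat) (ds : List Char), n < fuel →
    Nat.toDigitsCore 10 fuel n ds
      = (if n = 0 then ['0'] else (Nat.digits 10 n).reverse.map Nat.digitChar) ++ ds := by
  induction fuel with
  | zero => intro n ds h; omega
  | succ f ih =>
    intro n ds h
    by_cases hn : n = 0
    · subst hn; simp [Nat.toDigitsCore, Nat.digitChar]
    · rw [Nat.toDigitsCore]
      have hdig : Nat.digits 10 n = n % 10 :: Nat.digits 10 (n / 10) :=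
        Nat.digits_def' (by norm_num) (Nat.pos_of_ne_zero hn)
      by_cases h10 : n / 10 = 0
      · simp [h10, hn, hdig]
      · have hlt : n / 10 < f := by
          have := Nat.div_lt_self (Nat.pos_of_ne_zero hn) (show 1 < 10 by norm_num)
          omega
        rw [if_neg h10, ih (n / 10) _ hlt]
        simp [hn, h10, hdig]

theorem pv_altLoop_eq (n : Nat) : ∀ (t m : Int),
    pvAltLoop n t m = (t + ((Nat.digits 10 n).map Int.ofNat).sum,
                       if n = 0 then m else (((Nat.digits 10 n).getLast?.getD 0 : Nat) : Int)) := by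
  induction n using Nat.strong_induction_on with
  | _ n ih =>
    intro t m
    rw [pvAltLoop]
    by_cases hn : n = 0
    · simp [hn]
    · have hdig : Nat.digits 10 n = n % 10 :: Nat.digits 10 (n / 10) :=
        Nat.digits_def' (by norm_num) (Nat.pos_of_ne_zero hn)
      have hlt : n / 10 < n := Nat.div_lt_self (Nat.pos_of_ne_zero hn) (by norm_num)
      rw [dif_neg hn, ih (n / 10) hlt]
      by_cases h10 : n / 10 = 0
      · simp [hn, h10, hdig]
      · have hne : Nat.digits 10 (n / 10) ≠ [] := by
          simpa [Nat.digits_ne_nil_iff_ne_zero] using h10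
        obtain ⟨b, l', hb⟩ := List.exists_cons_of_ne_nil hne
        rw [Prod.mk.injEq]
        constructor
        · simp [hn, hdig]; ring
        · simp [hn, h10, hdig, hb, List.getLast?_cons_cons]

-- the character-based digit sum of str(m) equals the arithmetic digit sum, for m : Nat
theorem pv_digitSum_eq (m : Nat) :
    pvDigitSum (PySem.Int.toStr (m : Int)) = ((Nat.digits 10 m).map Int.ofNat).sum := by
  unfold pvDigitSum
  rw [PySem.Int.toList_toStr]
  unfold PySem.Int.toChars
  rw [if_neg (by omega), Int.toNat_natCast]
  unfold Nat.toDigits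
  rw [pv_toDigitsCore_eq (m + 1) m [] (by omega)]
  by_cases hm : m = 0
  · subst hm; decide
  · rw [if_neg hm]
    have hmap : ∀ l : List Nat, (∀ d ∈ l, d < 10) →
        ((l.map Nat.digitChar).map pvCharInt).sum = (l.map Int.ofNat).sum := by
      intro l hl
      induction l with
      | nil => rfl
      | cons a as iha =>
        simp only [List.map_cons, List.sum_cons]
        rw [pvCharInt_digitChar a (hl a (by simp)), iha (fun d hd => hl d (by simp [hd]))]
        rfl
    rw [List.append_nil, hmap _ (fun d hd => Nat.digits_lt_base (by norm_num) (List.mem_reverse.mp hd))]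
    rw [List.map_reverse, List.sum_reverse]

theorem pv_firstChar_eq (m : Nat) (hm : m ≠ 0) :
    ((PySem.Str.pyGet? (PySem.Int.toStr (m : Int)) 0).map pvCharInt).getD 0
      = (((Nat.digits 10 m).getLast?.getD 0 : Nat) : Int) := by
  have hchars : (PySem.Int.toStr (m : Int)).toList
      = (Nat.digits 10 m).reverse.map Nat.digitChar := by
    rw [PySem.Int.toList_toStr]
    unfold PySem.Int.toChars
    rw [if_neg (by omega), Int.toNat_natCast]
    unfold Nat.toDigits
    rw [pv_toDigitsCore_eq (m + 1) m [] (by omega), if_neg hm, List.append_nil]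
  have hne : Nat.digits 10 m ≠ [] := by simpa [Nat.digits_ne_nil_iff_ne_zero] using hm
  obtain ⟨y, hy⟩ := Option.isSome_iff_exists.mp (List.getLast?_isSome.mpr hne)
  have hmem : y ∈ Nat.digits 10 m := List.mem_of_getLast? hy
  have hget : PySem.Str.pyGet? (PySem.Int.toStr (m : Int)) 0 = some (Nat.digitChar y) := by
    simp only [PySem.Str.pyGet?_eq, PySem.Chars.pyGet?_eq_listPyGet?, hchars]
    rw [PySem.List.pyGet?_zero, ← List.head?_eq_getElem?, List.head?_map, List.head?_reverse, hy]
    rfl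
  rw [hget, hy]
  simp [pvCharInt_digitChar y (Nat.digits_lt_base (by norm_num) hmem)]

-- ===== VERDICT (by name: the statement is the Claim_ definition above) =====
theorem AmountSearch_spec : Claim_equal_AmountSearch := by
  intro number _
  unfold Spec_AmountSearch AmountSearch AmountSearch_alt
  by_cases h : number ≥ 0
  · rw [if_pos h, if_pos h]
    obtain ⟨m, rfl⟩ := Int.eq_ofNat_of_zero_le h
    rw [pv_altLoop_eq, pv_digitSum_eq]
    simp
  · rw [if_neg h, if_neg h]
    have hm : number.natAbs ≠ 0 := by omega
    have habs : |number| = (number.natAbs : Int) := by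
      rw [Int.abs_eq_natAbs]
    simp only [habs]
    rw [pv_altLoop_eq, pv_digitSum_eq, pv_firstChar_eq _ hm, if_neg hm]
    ring
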